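-- pv_equiv track=rewrite | github.com/iodn/ESP8266-smart-weather-clock | keygen.py | calculate_license
-- ===== SOURCE A (Python) =====
-- def calculate_license(mac_bytes):
--     """
--     Calculate license from MAC address using progressive CRC-8
--
--     Algorithm:
--     1. Start with template [0x19, 0x56, 0xAD, 0xC0, 0xB3, 0xF3]
--     2. For each position i:
--        - Replace template[i] with MAC[i]
--        - Calculate CRC-8 over entire array
--        - Store result as license[i]
--
--     Args:
--         mac_bytes: list of 6 bytes
--     Returns:
--         list of 6 license bytes
--     """
--     license = []
--
--     # Initial template (salt) - discovered at address DAT_3ffe8723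
--     working_array = [0x19, 0x56, 0xAD, 0xC0, 0xB3, 0xF3]
--
--     for i in range(6):
--         # Progressive replacement: update position i with MAC byte
--         working_array[i] = mac_bytes[i]
--
--         # CRC-8 calculation with polynomial 0x07
--         crc = 0xCD  # Initial CRC value
--
--         # Process all 6 bytes of current state
--         for j in range(6):
--             crc ^= working_array[j]
--
--             # Process 8 bits with polynomial 0x07
--             for bit in range(8):
--                 if crc & 0x80:  # Check MSB
--                     crc = ((crc << 1) ^ 0x07) & 0xFF
--                 else:
--                     crc = (crc << 1) & 0xFF
--
--         license.append(crc)
--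
--     return license
-- ===== SOURCE B (Python) =====
-- # Prefix-state CRC: license[i] is the CRC of mac[0..i] ++ TEMPLATE[i+1:], so keep a
-- # rolling CRC state over the MAC prefix and finish each position over the template
-- # suffix with a 256-entry table (poly 0x07, MSB-first) -- no working array, no bit loop.
--
-- _TEMPLATE = [0x19, 0x56, 0xAD, 0xC0, 0xB3, 0xF3]
--
-- _TABLE = []
-- for _v in range(256):
--     _c = _v
--     for _ in range(8):
--         _c = ((_c << 1) ^ 0x07) & 0xFF if _c & 0x80 else (_c << 1) & 0xFF
--     _TABLE.append(_c)
--
--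
-- def calculate_license(mac_bytes):
--     lic = []
--     prefix = 0xCD
--     for i in range(6):
--         prefix = _TABLE[(prefix ^ mac_bytes[i]) & 0xFF]
--         crc = prefix
--         for t in _TEMPLATE[i + 1:]:
--             crc = _TABLE[(crc ^ t) & 0xFF]
--         lic.append(crc)
--     return lic
-- ===== Notes on version B (the rewrite author's own statement) =====
-- stated objective: alternative
-- what changed: B drops A's mutated 6-byte working array and per-bit inner loop entirely: it keeps a rolling CRC state over the MAC prefix (each license byte's input is mac[0..i] ++ TEMPLATE[i+1:], and CRC folds left-to-right) and finishes each position by folding the template suffix slice through a 256-entry CRC-8 table (poly 0x07, MSB-first) built once at module load.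
import Mathlib
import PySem

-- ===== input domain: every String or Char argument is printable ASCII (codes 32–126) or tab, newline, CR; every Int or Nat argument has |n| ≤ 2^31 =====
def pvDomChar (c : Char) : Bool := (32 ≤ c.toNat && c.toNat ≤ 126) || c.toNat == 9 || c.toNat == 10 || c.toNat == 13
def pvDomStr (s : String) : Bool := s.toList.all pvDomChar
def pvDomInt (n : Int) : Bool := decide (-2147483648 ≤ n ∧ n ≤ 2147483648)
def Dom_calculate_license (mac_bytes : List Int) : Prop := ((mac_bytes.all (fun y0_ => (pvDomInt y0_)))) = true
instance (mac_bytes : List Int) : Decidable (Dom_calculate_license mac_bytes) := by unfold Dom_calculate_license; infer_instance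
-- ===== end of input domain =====

-- B replaces A's mutated working array + per-bit inner loop by a rolling prefix CRC state and a
-- table-driven fold over the template suffix; return values are proved equal whenever the list has
-- at least 6 elements (A raises IndexError otherwise).

-- ===== PORT A =====
-- the inner 'for bit in range(8)' loop of A
def pvBitLoop (crc : Int) : Int :=
  (List.range 8).foldl (fun c _ =>
    if PySem.Int.band c 0x80 ≠ 0 then
      PySem.Int.band (PySem.Int.bxor (c <<< (1 : Nat)) 0x07) 0xFF
    else
      PySem.Int.band (c <<< (1 : Nat)) 0xFF) crc

def calculate_license (mac_bytes : List Int) : List Int :=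
  (((PySem.List.pyRange 0 6 1).foldl (fun (st : List Int × List Int) i =>
      let wa := st.2.set i.toNat (PySem.List.pyGetD mac_bytes i 0)
      let crc := (PySem.List.pyRange 0 6 1).foldl
        (fun c j => pvBitLoop (PySem.Int.bxor c (PySem.List.pyGetD wa j 0))) 0xCD
      (st.1 ++ [crc], wa))
    (([] : List Int), [0x19, 0x56, 0xAD, 0xC0, 0xB3, 0xF3]))).1

-- ===== PORT B =====
def pvTemplate : List Int := [0x19, 0x56, 0xAD, 0xC0, 0xB3, 0xF3]

-- the module-load table builder of Source B (its 8-step body is Python-identical to A's bit loop)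
def pvTable : List Int :=
  (PySem.List.pyRange 0 256 1).map (fun v =>
    (List.range 8).foldl (fun c _ =>
      if PySem.Int.band c 0x80 ≠ 0 then
        PySem.Int.band (PySem.Int.bxor (c <<< (1 : Nat)) 0x07) 0xFF
      else
        PySem.Int.band (c <<< (1 : Nat)) 0xFF) v)

-- one table step: _TABLE[(c ^ b) & 0xFF]
def pvLook (c b : Int) : Int :=
  PySem.List.pyGetD pvTable (PySem.Int.band (PySem.Int.bxor c b) 0xFF) 0

def calculate_license_alt (mac_bytes : List Int) : List Int :=
  (((PySem.List.pyRange 0 6 1).foldl (fun (st : List Int × Int) i =>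
      let pfx := pvLook st.2 (PySem.List.pyGetD mac_bytes i 0)
      let crc := (PySem.List.slice pvTemplate (some (i + 1)) none).foldl pvLook pfx
      (st.1 ++ [crc], pfx))
    (([] : List Int), 0xCD))).1

-- ===== PRECONDITION & SPEC =====
-- Python A does mac_bytes[i] for i in range(6): IndexError (for both A and B) iff the list is shorter than 6.
def Pre_calculate_license (mac_bytes : List Int) : Prop := 6 ≤ mac_bytes.length
instance (mac_bytes : List Int) : Decidable (Pre_calculate_license mac_bytes) := by unfold Pre_calculate_license; infer_instance
def pvWitness_calculate_license : List Int := [1, 2, 3, 4, 5, 6]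

def Spec_calculate_license (mac_bytes : List Int) (out : List Int) : Prop := out = calculate_license_alt mac_bytes
instance (mac_bytes : List Int) (out : List Int) : Decidable (Spec_calculate_license mac_bytes out) := by unfold Spec_calculate_license; infer_instance

-- ===== CLAIM (what is proved, stated in full; the proofs are below) =====
def Claim_equal_calculate_license : Prop := ∀ (mac_bytes : List Int), Dom_calculate_license mac_bytes → Pre_calculate_license mac_bytes → Spec_calculate_license mac_bytes (calculate_license mac_bytes)

-- ===== LEMMAS AND PROOFS =====

lemma nat_and255 (x : Nat) : x &&& 255 = x % 256 := by
  have := Nat.and_two_pow_sub_one_eq_mod x 8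
  norm_num at this; omega

lemma band255 (a : Int) : PySem.Int.band a 255 = a % 256 := by
  unfold PySem.Int.band
  have h255 : (255 : Int).toNat = 255 := rfl
  by_cases ha : 0 ≤ a
  · rw [if_pos ha, if_pos (by norm_num)]
    rw [h255, nat_and255]
    omega
  · rw [if_neg ha, if_pos (by norm_num)]
    rw [h255, Nat.and_comm 255, nat_and255]
    omega

lemma nat_and128 (x : Nat) : x &&& 128 = if x % 256 < 128 then 0 else 128 := by
  have h := Nat.and_two_pow x 7
  rw [Nat.testBit_eq_decide_div_mod_eq] at h
  norm_num at h
  rcases Nat.lt_or_ge (x % 256) 128 with hl | hl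
  · have hd : ¬ x / 128 % 2 = 1 := by omega
    simp [hd] at h; simp [hl, h]
  · have hd : x / 128 % 2 = 1 := by omega
    simp [hd] at h; simp [h]; omega

lemma band128 (a : Int) : PySem.Int.band a 128 = if a % 256 < 128 then 0 else 128 := by
  unfold PySem.Int.band
  have h128 : (128 : Int).toNat = 128 := rfl
  by_cases ha : 0 ≤ a
  · rw [if_pos ha, if_pos (by norm_num), h128, nat_and128]
    split <;> split <;> omega
  · rw [if_neg ha, if_pos (by norm_num), h128, Nat.and_comm 128, nat_and128]
    split <;> split <;> omega

lemma nat_xor_mod (x y : Nat) : (x ^^^ y) % 256 = (x % 256) ^^^ (y % 256) := by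
  have := Nat.xor_mod_two_pow (a := x) (b := y) (n := 8)
  norm_num at this; omega

lemma nat_xor255 (z : Nat) (h : z < 256) : z ^^^ 255 = 255 - z := by
  interval_cases z <;> rfl

lemma xor_lt256 (u v : Nat) (hu : u < 256) (hv : v < 256) : u ^^^ v < 256 := by
  have := Nat.xor_lt_two_pow (x := u) (y := v) (n := 8) (by norm_num [hu]) (by norm_num [hv])
  norm_num at this; exact this

lemma bxor_mod (a b : Int) : (PySem.Int.bxor a b) % 256 = ((PySem.Int.bxor (a % 256) (b % 256)) % 256) := by
  have ha2 : ((a % 256).toNat : Int) = a % 256 := by omega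
  have hb2 : ((b % 256).toNat : Int) = b % 256 := by omega
  have hx : PySem.Int.bxor (a % 256) (b % 256) = ((a % 256).toNat ^^^ (b % 256).toNat : Nat) := by
    unfold PySem.Int.bxor
    rw [if_pos (by omega), if_pos (by omega)]
  rw [hx]
  have hma : (a % 256).toNat = a.toNat % 256 ∨ (a % 256).toNat = 255 - (-a-1).toNat % 256 := by
    by_cases h : 0 ≤ a
    · left; omega
    · right; omega
  unfold PySem.Int.bxor
  by_cases ha : 0 ≤ a <;> by_cases hb : 0 ≤ b
  · rw [if_pos ha, if_pos hb]
    have h1 : ((a.toNat ^^^ b.toNat : Nat) : Int) % 256 = ((a.toNat ^^^ b.toNat) % 256 : Nat) := by omega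
    rw [h1, nat_xor_mod]
    have e1 : (a % 256).toNat = a.toNat % 256 := by omega
    have e2 : (b % 256).toNat = b.toNat % 256 := by omega
    have hX : a.toNat % 256 ^^^ b.toNat % 256 < 256 :=
      xor_lt256 _ _ (Nat.mod_lt _ (by norm_num)) (Nat.mod_lt _ (by norm_num))
    rw [e1, e2]
    omega
  · rw [if_pos ha, if_neg hb]
    have e1 : (a % 256).toNat = a.toNat % 256 := by omega
    have e2 : (b % 256).toNat = 255 - (-b-1).toNat % 256 := by omega
    rw [e1, e2]
    set x := a.toNat with hxd; set m := (-b-1).toNat with hmd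
    have hr : m % 256 < 256 := Nat.mod_lt _ (by norm_num)
    have hS : x % 256 ^^^ m % 256 < 256 :=
      xor_lt256 _ _ (Nat.mod_lt _ (by norm_num)) hr
    have hmod : (x ^^^ m) % 256 = x % 256 ^^^ m % 256 := nat_xor_mod x m
    have hcomp : x % 256 ^^^ (255 - m % 256) = 255 - (x % 256 ^^^ m % 256) := by
      rw [show (255 : Nat) - m % 256 = (m % 256) ^^^ 255 from (nat_xor255 (m % 256) hr).symm,
          ← Nat.xor_assoc, nat_xor255 (x % 256 ^^^ m % 256) hS]
    rw [hcomp]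
    omega
  · rw [if_neg ha, if_pos hb]
    have e1 : (a % 256).toNat = 255 - (-a-1).toNat % 256 := by omega
    have e2 : (b % 256).toNat = b.toNat % 256 := by omega
    rw [e1, e2]
    set m := (-a-1).toNat with hmd; set y := b.toNat with hyd
    have hr : m % 256 < 256 := Nat.mod_lt _ (by norm_num)
    have hy : y % 256 < 256 := Nat.mod_lt _ (by norm_num)
    have hS : m % 256 ^^^ y % 256 < 256 := xor_lt256 _ _ hr hy
    have hmod : (m ^^^ y) % 256 = m % 256 ^^^ y % 256 := nat_xor_mod m y
    have hcomp : (255 - m % 256) ^^^ (y % 256) = 255 - (m % 256 ^^^ y % 256) := by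
      rw [show (255 : Nat) - m % 256 = (m % 256) ^^^ 255 from (nat_xor255 (m % 256) hr).symm,
          Nat.xor_comm (m % 256) 255, Nat.xor_assoc, Nat.xor_comm 255,
          nat_xor255 (m % 256 ^^^ y % 256) hS]
    rw [hcomp]
    omega
  · rw [if_neg ha, if_neg hb]
    have e1 : (a % 256).toNat = 255 - (-a-1).toNat % 256 := by omega
    have e2 : (b % 256).toNat = 255 - (-b-1).toNat % 256 := by omega
    rw [e1, e2]
    set m := (-a-1).toNat with hmd; set k := (-b-1).toNat with hkd
    have hrm : m % 256 < 256 := Nat.mod_lt _ (by norm_num)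
    have hrk : k % 256 < 256 := Nat.mod_lt _ (by norm_num)
    have hS : m % 256 ^^^ k % 256 < 256 := xor_lt256 _ _ hrm hrk
    have hmod : (m ^^^ k) % 256 = m % 256 ^^^ k % 256 := nat_xor_mod m k
    have hcomp : (255 - m % 256) ^^^ (255 - k % 256) = m % 256 ^^^ k % 256 := by
      rw [show (255 : Nat) - m % 256 = (m % 256) ^^^ 255 from (nat_xor255 (m % 256) hrm).symm,
          show (255 : Nat) - k % 256 = (k % 256) ^^^ 255 from (nat_xor255 (k % 256) hrk).symm]
      rw [Nat.xor_assoc, Nat.xor_comm 255, Nat.xor_assoc, Nat.xor_self, Nat.xor_zero]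
    rw [hcomp]
    omega

-- one step of the bit loop only depends on the argument modulo 256
lemma pvStep_mod (y : Int) :
    (if PySem.Int.band (y % 256) 0x80 ≠ 0 then
        PySem.Int.band (PySem.Int.bxor ((y % 256) <<< (1 : Nat)) 0x07) 0xFF
      else
        PySem.Int.band ((y % 256) <<< (1 : Nat)) 0xFF)
    = (if PySem.Int.band y 0x80 ≠ 0 then
        PySem.Int.band (PySem.Int.bxor (y <<< (1 : Nat)) 0x07) 0xFF
      else
        PySem.Int.band (y <<< (1 : Nat)) 0xFF) := by
  simp only [band128, band255, Int.shiftLeft_eq, bxor_mod ((y % 256) * 2 ^ 1) 7,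
    bxor_mod (y * 2 ^ 1) 7]
  have h1 : y % 256 % 256 = y % 256 := by omega
  have h2 : y % 256 * 2 ^ 1 % 256 = y * 2 ^ 1 % 256 := by omega
  rw [h1, h2]

lemma pvBitLoop_mod (y : Int) : pvBitLoop (y % 256) = pvBitLoop y := by
  unfold pvBitLoop
  rw [show List.range 8 = 0 :: [1, 2, 3, 4, 5, 6, 7] from rfl]
  conv_lhs => rw [List.foldl_cons]
  conv_rhs => rw [List.foldl_cons]
  rw [pvStep_mod]

-- B's table lookup computes A's bit loop on the XOR of its two arguments
lemma pvLook_eq (c b : Int) : pvLook c b = pvBitLoop (PySem.Int.bxor c b) := by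
  set y := PySem.Int.bxor c b with hy
  show PySem.List.pyGetD pvTable (PySem.Int.band y 0xFF) 0 = pvBitLoop y
  rw [show (0xFF : Int) = 255 from rfl, band255]
  have h0 : 0 ≤ y % 256 := by omega
  have h1 : y % 256 < 256 := by omega
  have htb : pvTable = (PySem.List.pyRange 0 256 1).map (fun v => pvBitLoop v) := rfl
  have hlen : pvTable.length = 256 := by
    rw [htb, List.length_map, PySem.List.length_pyRange_one]
    rfl
  rw [PySem.List.pyGetD_eq_getElem pvTable 0 h0 (by rw [hlen]; exact_mod_cast h1)]
  rw [List.getElem_of_eq htb]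
  rw [List.getElem_map, PySem.List.getElem_pyRange_one]
  rw [zero_add, show (((y % 256).toNat : Nat) : Int) = y % 256 by omega, pvBitLoop_mod]

-- ===== VERDICT (by name: the statement is the Claim_ definition above) =====
set_option maxHeartbeats 2000000 in
theorem calculate_license_spec : Claim_equal_calculate_license := by
  intro mac_bytes _ hpre
  unfold Spec_calculate_license calculate_license calculate_license_alt
  unfold Pre_calculate_license at hpre
  obtain ⟨m0, m1, m2, m3, m4, m5, rest, rfl⟩ :
      ∃ m0 m1 m2 m3 m4 m5 rest, mac_bytes = m0 :: m1 :: m2 :: m3 :: m4 :: m5 :: rest := by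
    match mac_bytes, hpre with
    | m0 :: m1 :: m2 :: m3 :: m4 :: m5 :: rest, _ => exact ⟨m0, m1, m2, m3, m4, m5, rest, rfl⟩
  rw [show PySem.List.pyRange 0 6 1 = [0, 1, 2, 3, 4, 5] from by decide]
  have h6 : (0:Int) ≤ (rest.length : Int) + 1 + 1 + 1 + 1 + 1 := by positivity
  simp only [List.foldl_cons, List.foldl_nil]
  simp [PySem.List.pyGetD, PySem.List.pyGet?, PySem.List.pyIdx?, PySem.List.slice,
    pvTemplate, h6]
  simp only [pvLook_eq]
  exact ⟨trivial, trivial, trivial, trivial, trivial, trivial⟩
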